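-- pv_equiv track=rewrite | github.com/edt-yxz-zzd/python3_src | nn_ns/graph/nauty/cnauty.py | _cnauty_results
-- ===== SOURCE A (Python) =====
-- import array, itertools, collections
--
-- def _cnauty_results(errstatus, lab, ptn, orbits):
--     if errstatus:
--         raise RuntimeError('nauty stats.errstatus != 0: {!r}'.format(errstatus))
--
--
--     #orbits = list(orbits)
--     d = collections.defaultdict(list)
--     for i, orbit_idx in enumerate(orbits):
--         d[orbit_idx].append(i)
--     orbits = list(d[key] for key in sorted(d.keys()))
--
--     #assert all(not c for c in ptn)
--     canon_vtx2old_vtx = tuple(lab)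
--     leveled_partition = tuple(ptn)
--
--     return canon_vtx2old_vtx, leveled_partition, orbits
-- ===== SOURCE B (Python) =====
-- def _cnauty_results(errstatus, lab, ptn, orbits):
--     if errstatus:
--         raise RuntimeError('nauty stats.errstatus != 0: {!r}'.format(errstatus))
--     keys = sorted(set(orbits))
--     groups = [[i for i, v in enumerate(orbits) if v == k] for k in keys]
--     return tuple(lab), tuple(ptn), groups
-- ===== Notes on version B (the rewrite author's own statement) =====
-- stated objective: simpler
-- what changed: Replaces the defaultdict grouping pass with sorted(set(orbits)) plus one comprehension per key, eliminating the mutable dict entirely.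
import Mathlib
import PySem

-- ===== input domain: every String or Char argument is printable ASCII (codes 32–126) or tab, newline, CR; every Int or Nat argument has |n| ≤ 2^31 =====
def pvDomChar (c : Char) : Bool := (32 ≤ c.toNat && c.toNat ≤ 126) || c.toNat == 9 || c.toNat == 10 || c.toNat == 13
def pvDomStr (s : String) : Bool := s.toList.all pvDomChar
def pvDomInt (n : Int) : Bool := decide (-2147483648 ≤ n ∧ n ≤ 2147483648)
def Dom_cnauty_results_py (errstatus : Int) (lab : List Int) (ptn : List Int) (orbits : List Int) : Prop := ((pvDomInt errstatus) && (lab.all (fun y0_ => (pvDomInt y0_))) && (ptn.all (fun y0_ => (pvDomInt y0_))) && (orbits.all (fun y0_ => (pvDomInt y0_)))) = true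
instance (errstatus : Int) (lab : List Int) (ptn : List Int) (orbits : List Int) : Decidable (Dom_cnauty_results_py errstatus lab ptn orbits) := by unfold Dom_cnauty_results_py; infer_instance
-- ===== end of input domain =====

-- B replaces A's defaultdict grouping with sorted(set(orbits)) and one index-comprehension per key (no dict); same result, no speed claim.


-- ===== PORT A =====
def cnauty_results_py (errstatus : Int) (lab : List Int) (ptn : List Int) (orbits : List Int) : List Int × List Int × List (List Int) :=
  if errstatus ≠ 0 then ([], [], [])  -- Python raises RuntimeError here; excluded by Pre_
  else
    -- d = defaultdict(list); for i, orbit_idx in enumerate(orbits): d[orbit_idx].append(i)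
    let d := (PySem.List.enumerate orbits).foldl
      (fun d p => d.modify p.2 [] (fun v => v ++ [p.1])) PySem.Dict.empty
    -- orbits = list(d[key] for key in sorted(d.keys()))
    let groups := (PySem.List.sorted d.keys (fun x => x) false).map (fun k => d.getD k [])
    (lab, ptn, groups)

-- ===== PORT B =====
def cnauty_results_py_alt (errstatus : Int) (lab : List Int) (ptn : List Int) (orbits : List Int) : List Int × List Int × List (List Int) :=
  if errstatus ≠ 0 then ([], [], [])  -- Python raises RuntimeError here; excluded by Pre_
  else
    -- keys = sorted(set(orbits))
    let keys := PySem.List.sorted (PySem.Set.ofList orbits) (fun x => x) false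
    -- groups = [[i for i, v in enumerate(orbits) if v == k] for k in keys]
    let groups := keys.map (fun k =>
      ((PySem.List.enumerate orbits).filter (fun p => p.2 == k)).map (fun p => p.1))
    (lab, ptn, groups)

-- ===== PRECONDITION & SPEC =====
-- Pre_ excludes exactly errstatus ≠ 0, where the Python A raises RuntimeError (B raises there too).
def Pre_cnauty_results_py (errstatus : Int) (lab : List Int) (ptn : List Int) (orbits : List Int) : Prop := errstatus = 0
instance (errstatus : Int) (lab : List Int) (ptn : List Int) (orbits : List Int) : Decidable (Pre_cnauty_results_py errstatus lab ptn orbits) := by unfold Pre_cnauty_results_py; infer_instance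
def pvWitness_cnauty_results_py : Int × List Int × List Int × List Int := (0, [1, 0, 2], [0, 0, 0], [0, 0, 0])

def Spec_cnauty_results_py (errstatus : Int) (lab : List Int) (ptn : List Int) (orbits : List Int) (out : List Int × List Int × List (List Int)) : Prop := out = cnauty_results_py_alt errstatus lab ptn orbits
instance (errstatus : Int) (lab : List Int) (ptn : List Int) (orbits : List Int) (out : List Int × List Int × List (List Int)) : Decidable (Spec_cnauty_results_py errstatus lab ptn orbits out) := by unfold Spec_cnauty_results_py; infer_instance

-- ===== CLAIM (what is proved, stated in full; the proofs are below) =====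
def Claim_equal_cnauty_results_py : Prop := ∀ (errstatus : Int) (lab : List Int) (ptn : List Int) (orbits : List Int), Dom_cnauty_results_py errstatus lab ptn orbits → Pre_cnauty_results_py errstatus lab ptn orbits → Spec_cnauty_results_py errstatus lab ptn orbits (cnauty_results_py errstatus lab ptn orbits)

-- ===== LEMMAS AND PROOFS =====

-- The keys of A's grouping dict are exactly set(orbits) (first occurrences, in order).
lemma keys_groupDict (orbits : List Int) :
    ((PySem.List.enumerate orbits).foldl
      (fun d p => d.modify p.2 [] (fun v => v ++ [p.1])) PySem.Dict.empty).keys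
    = PySem.Set.ofList orbits := by
  rw [PySem.Dict.keys_foldl_modify_key]
  simp [PySem.Dict.keys_empty, PySem.List.map_snd_enumerate]
  rfl

-- A's dict lookup at k is B's filtered index list for k.
lemma getD_groupDict (orbits : List Int) (k : Int) :
    ((PySem.List.enumerate orbits).foldl
      (fun d p => d.modify p.2 [] (fun v => v ++ [p.1])) PySem.Dict.empty).getD k []
    = ((PySem.List.enumerate orbits).filter (fun p => p.2 == k)).map (fun p => p.1) := by
  have h := PySem.Dict.getD_foldl_modify_append
    (l := (PySem.List.enumerate orbits).map (fun p => (p.2, p.1)))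
    (d := (PySem.Dict.empty : PySem.Dict Int (List Int))) (c := k)
  rw [List.foldl_map] at h
  simpa [List.filter_map, List.map_map, Function.comp] using h

-- ===== VERDICT (by name: the statement is the Claim_ definition above) =====
theorem cnauty_results_py_spec : Claim_equal_cnauty_results_py := by
  intro errstatus lab ptn orbits _ hpre
  unfold Spec_cnauty_results_py cnauty_results_py cnauty_results_py_alt
  subst hpre
  simp only [ne_eq, not_true_eq_false, if_false]
  refine congrArg (Prod.mk lab) (congrArg (Prod.mk ptn) ?_)
  rw [keys_groupDict]
  exact List.map_congr_left (fun k _ => getD_groupDict orbits k)
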